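-- pv_equiv track=rewrite | github.com/shelkeom230/striver-DSA-bootcamp | binary search/medium.py | bruteSolution
-- ===== SOURCE A (Python) =====
-- def findDays(weights, cap):
--     days, load = 1, 0
--
--     for i in range(len(weights)):
--         if load + weights[i] > cap:
--             days += 1
--             load = weights[i]
--         else:
--             load += weights[i]
--     return days
--
-- def bruteSolution(weights, d):
--     # min capacity value
--     minCapacity = min(weights)
--     # max capacity value, d=1
--     maxCapacity = sum(weights)
--
--     # check for all possible capacity values
--     for i in range(minCapacity, maxCapacity):
--         # find no of days required with current capacity
--         noofdays = findDays(weights, i)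
--
--         # if no of days are less than or equal to d, then this is our answer
--         if noofdays <= d:
--             return i
--
--     # else just reutrn the max maxCapacity
--     return maxCapacity
-- ===== SOURCE B (Python) =====
-- def daysNeeded(weights, cap):
--     days, load = 1, 0
--     for w in weights:
--         if load + w > cap:
--             days += 1
--             load = w
--         else:
--             load += w
--     return days
--
--
-- def bruteSolution(weights, d):
--     lo, hi = min(weights), sum(weights)
--     while lo < hi:
--         mid = (lo + hi) // 2
--         if daysNeeded(weights, mid) <= d:
--             hi = mid
--         else:
--             lo = mid + 1
--     return hi
-- ===== Notes on version B (the rewrite author's own statement) =====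
-- stated objective: alternative
-- what changed: Replaces A's linear scan over every candidate capacity from min(weights) to sum(weights) by a binary search on capacity using the same greedy feasibility check; Pre_ excludes the empty list (min([]) raises ValueError in both programs) and negative-weight instances on which the day limit actually bites (0 < d <= len(weights)): negative weights lie outside the ship-capacity problem's natural domain and exactly there the greedy day count stops being monotone in the capacity, so the two search orders may legitimately pick different capacities.
-- outside the precondition, e.g. on bruteSolution([], 1): A raises ValueError, B raises ValueError; on bruteSolution([8, -8, 7, -4], 3): A returns -1, B returns 3
import Mathlib
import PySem

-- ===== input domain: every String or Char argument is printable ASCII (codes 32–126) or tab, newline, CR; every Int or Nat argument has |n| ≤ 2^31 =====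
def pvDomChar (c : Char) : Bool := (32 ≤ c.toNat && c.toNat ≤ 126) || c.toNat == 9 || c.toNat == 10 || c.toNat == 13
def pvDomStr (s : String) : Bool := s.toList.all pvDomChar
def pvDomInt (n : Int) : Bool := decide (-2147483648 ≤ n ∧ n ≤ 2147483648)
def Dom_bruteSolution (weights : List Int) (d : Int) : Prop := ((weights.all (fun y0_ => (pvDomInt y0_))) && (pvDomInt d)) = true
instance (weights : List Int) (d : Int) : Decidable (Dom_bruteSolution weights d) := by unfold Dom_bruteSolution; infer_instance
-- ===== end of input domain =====

-- B replaces A's linear scan over all candidate capacities by a binary search on capacity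
-- (objective: alternative algorithm; same exact values on Pre_).


-- ===== PORT A =====
-- loop body of A's findDays (state = (days, load), next weight w)
def aStep (cap : Int) (st : Int × Int) (w : Int) : Int × Int :=
  if st.2 + w > cap then (st.1 + 1, w) else (st.1, st.2 + w)

def findDays (weights : List Int) (cap : Int) : Int :=
  ((PySem.List.pyRange 0 (weights.length : Int) 1).foldl
    (fun st i => aStep cap st (PySem.List.pyGetD weights i 0)) ((1 : Int), (0 : Int))).1

-- A's 'for i in range(minCapacity, maxCapacity)' with the early return, as a recursion on i
-- (range(a, b) is lazy in Python, so the loop is ported as a loop, not as a materialised list)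
def scanLoop (weights : List Int) (d : Int) (i maxCapacity : Int) : Int :=
  if h : i < maxCapacity then
    if findDays weights i ≤ d then i   -- early return inside the for-loop
    else scanLoop weights d (i + 1) maxCapacity
  else maxCapacity                      -- fell through the loop
termination_by (maxCapacity - i).toNat
decreasing_by omega

def bruteSolution (weights : List Int) (d : Int) : Int :=
  match PySem.List.min? weights (fun x => x) with
  | none => 0   -- Python: min([]) raises ValueError; excluded by Pre_
  | some minCapacity => scanLoop weights d minCapacity weights.sum

-- ===== PORT B =====
-- B's daysNeeded: the same greedy day count, iterated directly over the weights
def daysNeeded (weights : List Int) (cap : Int) : Int :=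
  (weights.foldl
    (fun (st : Int × Int) w => if st.2 + w > cap then (st.1 + 1, w) else (st.1, st.2 + w))
    ((1 : Int), (0 : Int))).1

def bsearchLoop (weights : List Int) (d : Int) (lo hi : Int) : Int :=
  if h : lo < hi then
    let mid := PySem.Int.floordiv (lo + hi) 2
    if daysNeeded weights mid ≤ d then bsearchLoop weights d lo mid
    else bsearchLoop weights d (mid + 1) hi
  else hi
termination_by (hi - lo).toNat
decreasing_by
  · have hb := PySem.Int.floordiv_two_mid_bounds (lo := lo) (hi := hi) (le_of_lt h)
    have hlt : PySem.Int.floordiv (lo + hi) 2 < hi :=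
      (PySem.Int.floordiv_lt_iff_lt_mul (by omega)).mpr (by omega)
    omega
  · have hb := PySem.Int.floordiv_two_mid_bounds (lo := lo) (hi := hi) (le_of_lt h)
    omega

def bruteSolution_alt (weights : List Int) (d : Int) : Int :=
  match PySem.List.min? weights (fun x => x) with
  | none => 0   -- Python: min([]) raises ValueError; excluded by Pre_
  | some lo => bsearchLoop weights d lo weights.sum

-- ===== PRECONDITION & SPEC =====
-- Pre_ excludes [] (both programs raise ValueError on min of an empty sequence) and the
-- negative-weight instances on which the day limit actually bites (0 < d ≤ len(weights)):
-- negative package weights lie outside the ship-capacity problem's natural domain, and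
-- exactly there the greedy day count can fail to be monotone in the capacity, so the linear
-- first-hit and the binary search may legitimately pick different capacities; when d ≤ 0
-- (no capacity feasible) or d > len(weights) (every capacity feasible) the limit cannot
-- bite and negative weights stay inside Pre_.
def Pre_bruteSolution (weights : List Int) (d : Int) : Prop :=
  weights ≠ [] ∧ (d ≤ 0 ∨ (weights.length : Int) < d ∨ ∀ w ∈ weights, 0 ≤ w)
instance (weights : List Int) (d : Int) : Decidable (Pre_bruteSolution weights d) := by
  unfold Pre_bruteSolution; infer_instance

def pvWitness_bruteSolution : List Int × Int := ([1, 2, 3, 1, 1], 3)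

def Spec_bruteSolution (weights : List Int) (d : Int) (out : Int) : Prop := out = bruteSolution_alt weights d
instance (weights : List Int) (d : Int) (out : Int) : Decidable (Spec_bruteSolution weights d out) := by unfold Spec_bruteSolution; infer_instance

-- ===== CLAIM (what is proved, stated in full; the proofs are below) =====
def Claim_equal_bruteSolution : Prop := ∀ (weights : List Int) (d : Int), Dom_bruteSolution weights d → Pre_bruteSolution weights d → Spec_bruteSolution weights d (bruteSolution weights d)

-- ===== LEMMAS AND PROOFS =====

-- A's index-loop day count is B's direct-loop day count.
theorem findDays_eq_daysNeeded (weights : List Int) (cap : Int) :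
    findDays weights cap = daysNeeded weights cap := by
  unfold findDays daysNeeded
  have h := PySem.List.foldl_pyRange_zero_pyGetD weights 0 (aStep cap) ((1 : Int), (0 : Int))
  simp only [PySem.List.len_eq] at h
  rw [h]
  rfl

-- Invariant comparing the greedy fold at a smaller capacity c1 with a larger capacity c2.
def dayInv (s1 s2 : Int × Int) : Prop :=
  0 ≤ s1.2 ∧ 0 ≤ s2.2 ∧ (s2.1 < s1.1 ∨ (s1.1 = s2.1 ∧ s2.2 ≤ s1.2))

theorem foldl_greedy_mono (ws : List Int) (hw : ∀ w ∈ ws, 0 ≤ w)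
    (c1 c2 : Int) (hc : c1 ≤ c2) :
    ∀ s1 s2 : Int × Int, dayInv s1 s2 →
      dayInv (ws.foldl
          (fun (st : Int × Int) w => if st.2 + w > c1 then (st.1 + 1, w) else (st.1, st.2 + w)) s1)
        (ws.foldl
          (fun (st : Int × Int) w => if st.2 + w > c2 then (st.1 + 1, w) else (st.1, st.2 + w)) s2) := by
  induction ws with
  | nil => intro s1 s2 h; simpa using h
  | cons w t ih =>
    intro s1 s2 h
    obtain ⟨d1, l1⟩ := s1
    obtain ⟨d2, l2⟩ := s2
    have hw0 : 0 ≤ w := hw w (by simp)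
    have hwt : ∀ x ∈ t, 0 ≤ x := fun x hx => hw x (by simp [hx])
    simp only [List.foldl_cons]
    refine ih hwt _ _ ?_
    obtain ⟨h1, h2, h3⟩ := h
    simp only [dayInv] at *
    split_ifs with hA hB hB <;> simp_all <;> omega

-- The greedy day count is antitone in the capacity, for nonnegative weights.
theorem daysNeeded_antitone (ws : List Int) (hw : ∀ w ∈ ws, 0 ≤ w)
    {c1 c2 : Int} (hc : c1 ≤ c2) : daysNeeded ws c2 ≤ daysNeeded ws c1 := by
  have h := foldl_greedy_mono ws hw c1 c2 hc (1, 0) (1, 0) (by simp [dayInv])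
  unfold daysNeeded
  rcases h.2.2 with h' | h' <;> omega

-- The day count is at least 1 and at most len+1, whatever the capacity.
theorem foldl_fst_bounds (ws : List Int) (cap : Int) : ∀ s : Int × Int,
    s.1 ≤ (ws.foldl
      (fun (st : Int × Int) w => if st.2 + w > cap then (st.1 + 1, w) else (st.1, st.2 + w)) s).1 ∧
    (ws.foldl
      (fun (st : Int × Int) w => if st.2 + w > cap then (st.1 + 1, w) else (st.1, st.2 + w)) s).1
      ≤ s.1 + ws.length := by
  induction ws with
  | nil => intro s; simp
  | cons w t ih =>
    intro s
    simp only [List.foldl_cons, List.length_cons]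
    split_ifs with h
    · have := ih (s.1 + 1, w); constructor <;> [omega; (push_cast; omega)]
    · have := ih (s.1, s.2 + w); constructor <;> [omega; (push_cast; omega)]

theorem daysNeeded_bounds (ws : List Int) (cap : Int) :
    1 ≤ daysNeeded ws cap ∧ daysNeeded ws cap ≤ 1 + ws.length := by
  have := foldl_fst_bounds ws cap ((1 : Int), (0 : Int))
  unfold daysNeeded
  omega

-- What both searches compute: the characterisation of the answer on [lo, hi].
def answerP (weights : List Int) (d lo hi r : Int) : Prop :=
  lo ≤ r ∧ r ≤ hi ∧ (∀ c, lo ≤ c → c < r → ¬ daysNeeded weights c ≤ d) ∧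
    (r < hi → daysNeeded weights r ≤ d)

theorem answerP_unique {weights : List Int} {d lo hi r1 r2 : Int}
    (h1 : answerP weights d lo hi r1) (h2 : answerP weights d lo hi r2) : r1 = r2 := by
  obtain ⟨a1, b1, c1, e1⟩ := h1
  obtain ⟨a2, b2, c2, e2⟩ := h2
  rcases lt_trichotomy r1 r2 with h | h | h
  · exact absurd (e1 (by omega)) (c2 r1 (by omega) h)
  · exact h
  · exact absurd (e2 (by omega)) (c1 r2 (by omega) h)

-- B's binary search satisfies the characterisation.
theorem bsearchLoop_P (weights : List Int) (d : Int)
    (hmono : ∀ a b : Int, a ≤ b → daysNeeded weights a ≤ d → daysNeeded weights b ≤ d) :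
    ∀ lo hi : Int, lo ≤ hi → answerP weights d lo hi (bsearchLoop weights d lo hi) := by
  intro lo hi
  induction lo, hi using bsearchLoop.induct weights d with
  | case1 lo hi h mid hfeas ih =>
    intro _
    have hmid : PySem.Int.floordiv (lo + hi) 2 = mid := rfl
    have hb := PySem.Int.floordiv_two_mid_bounds (lo := lo) (hi := hi) (le_of_lt h)
    rw [hmid] at hb
    rw [bsearchLoop]
    simp only [dif_pos h, hmid]
    rw [if_pos hfeas]
    obtain ⟨a, b, c, e⟩ := ih (by omega)
    refine ⟨a, by omega, c, fun hrh => ?_⟩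
    by_cases hrm : bsearchLoop weights d lo mid < mid
    · exact e hrm
    · have hrmeq : bsearchLoop weights d lo mid = mid := by omega
      rw [hrmeq]; exact hfeas
  | case2 lo hi h mid hfeas ih =>
    intro _
    have hmid : PySem.Int.floordiv (lo + hi) 2 = mid := rfl
    have hb := PySem.Int.floordiv_two_mid_bounds (lo := lo) (hi := hi) (le_of_lt h)
    rw [hmid] at hb
    have hlt : mid < hi := by
      rw [← hmid]; exact (PySem.Int.floordiv_lt_iff_lt_mul (by omega)).mpr (by omega)
    rw [bsearchLoop]
    simp only [dif_pos h, hmid]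
    rw [if_neg hfeas]
    obtain ⟨a, b, c, e⟩ := ih (by omega)
    refine ⟨by omega, b, fun cc hc1 hc2 hF => ?_, e⟩
    by_cases hcm : cc ≤ mid
    · exact hfeas (hmono cc mid hcm hF)
    · exact c cc (by omega) hc2 hF
  | case3 lo hi h =>
    intro hle
    have hlh : lo = hi := by omega
    rw [bsearchLoop]
    simp only [dif_neg h]
    exact ⟨by omega, le_refl _, by intro c h1 h2; omega, by intro hh; omega⟩

-- A's linear first-hit scan satisfies the same characterisation.
theorem scanLoop_P (weights : List Int) (d : Int) : ∀ n : Nat, ∀ lo hi : Int,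
    (hi - lo).toNat = n → lo ≤ hi →
    answerP weights d lo hi (scanLoop weights d lo hi) := by
  intro n
  induction n with
  | zero =>
    intro lo hi hn hle
    have hlh : lo = hi := by omega
    rw [scanLoop]
    simp only [dif_neg (by omega : ¬ lo < hi)]
    exact ⟨by omega, le_refl _, by intro c h1 h2; omega, by intro hh; omega⟩
  | succ k ih =>
    intro lo hi hn hle
    have hlt : lo < hi := by omega
    rw [scanLoop]
    simp only [dif_pos hlt, findDays_eq_daysNeeded]
    by_cases hF : daysNeeded weights lo ≤ d
    · rw [if_pos hF]
      exact ⟨le_refl _, by omega, by intro c h1 h2; omega, fun _ => hF⟩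
    · rw [if_neg hF]
      obtain ⟨a, b, c, e⟩ := ih (lo + 1) hi (by omega) (by omega)
      refine ⟨by omega, b, fun cc hc1 hc2 hcF => ?_, e⟩
      by_cases hcc : cc = lo
      · exact hF (hcc ▸ hcF)
      · exact c cc (by omega) hc2 hcF

-- ===== VERDICT (by name: the statement is the Claim_ definition above) =====
theorem bruteSolution_spec : Claim_equal_bruteSolution := by
  intro weights d _ hpre
  obtain ⟨hne, hcase⟩ := hpre
  unfold Spec_bruteSolution bruteSolution bruteSolution_alt
  obtain ⟨m, hm⟩ : ∃ m, PySem.List.min? weights (fun x => x) = some m := by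
    cases hmin : PySem.List.min? weights (fun x => x) with
    | none => exact absurd ((PySem.List.min?_eq_none_iff weights (fun x => x)).mp hmin) hne
    | some m => exact ⟨m, rfl⟩
  rw [hm]
  by_cases hms : m ≤ weights.sum
  · have hmono : ∀ a b : Int, a ≤ b → daysNeeded weights a ≤ d → daysNeeded weights b ≤ d := by
      rcases hcase with h0 | hbig | hnn
      · intro a b _ hF; have := (daysNeeded_bounds weights a).1; omega
      · intro a b _ _; have := (daysNeeded_bounds weights b).2; omega
      · exact fun a b hab hF => le_trans (daysNeeded_antitone weights hnn hab) hF
    have hA := scanLoop_P weights d (weights.sum - m).toNat m weights.sum rfl hms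
    have hB := bsearchLoop_P weights d hmono m weights.sum hms
    exact answerP_unique hA hB
  · show scanLoop weights d m weights.sum = bsearchLoop weights d m weights.sum
    rw [scanLoop, bsearchLoop]
    simp only [dif_neg (by omega : ¬ m < weights.sum)]
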